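-- pv_equiv track=rewrite | github.com/krizzo101/master_root | opsvi/opsvi_opsvi/applications/specstory_intelligence/analytics/context_compression_engine.py | _group_similar_content
-- ===== SOURCE A (Python) =====
-- from typing import Any, Dict, List, Optional
--
-- def _group_similar_content(components: List[Dict]) -> Dict[str, List[Dict]]:
--     """Group similar conversation components for redundancy analysis"""
--     groups = {
--         "explanations": [],
--         "confirmations": [],
--         "repetitive_concepts": [],
--         "technical_details": [],
--         "decisions": [],
--         "insights": [],
--     }
--
--     for component in components:
--         content = component.get("content", "").lower()
--
--         # Simple classification - could be enhanced with NLP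
--         if any(word in content for word in ["understand", "got it", "makes sense"]):
--             groups["confirmations"].append(component)
--         elif any(word in content for word in ["implement", "create", "build"]):
--             groups["technical_details"].append(component)
--         elif any(word in content for word in ["decide", "choose", "should"]):
--             groups["decisions"].append(component)
--         elif any(
--             word in content for word in ["insight", "realize", "breakthrough"]
--         ):
--             groups["insights"].append(component)
--         else:
--             groups["explanations"].append(component)
--
--     return groups
-- ===== SOURCE B (Python) =====
-- def _group_similar_content(components):
--     """Group similar conversation components for redundancy analysis"""
--
--     def _split(items, keywords):
--         hit, miss = [], []
--         for comp in items:
--             text = comp.get("content", "").lower()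
--             if any(w in text for w in keywords):
--                 hit.append(comp)
--             else:
--                 miss.append(comp)
--         return hit, miss
--
--     confirmations, rest = _split(components, ["understand", "got it", "makes sense"])
--     technical_details, rest = _split(rest, ["implement", "create", "build"])
--     decisions, rest = _split(rest, ["decide", "choose", "should"])
--     insights, explanations = _split(rest, ["insight", "realize", "breakthrough"])
--
--     return {
--         "explanations": explanations,
--         "confirmations": confirmations,
--         "repetitive_concepts": [],
--         "technical_details": technical_details,
--         "decisions": decisions,
--         "insights": insights,
--     }
-- ===== Notes on version B (the rewrite author's own statement) =====
-- stated objective: alternative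
-- what changed: Replaces the single pass with a per-item if/elif branch chain and in-place dict appends by four staged stable partitions: the component list is successively split into (confirmations, rest), (technical_details, rest), (decisions, rest), (insights, explanations), and the result dict is assembled once from these pieces; the elif priority becomes the sieve order of the passes.
import Mathlib
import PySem

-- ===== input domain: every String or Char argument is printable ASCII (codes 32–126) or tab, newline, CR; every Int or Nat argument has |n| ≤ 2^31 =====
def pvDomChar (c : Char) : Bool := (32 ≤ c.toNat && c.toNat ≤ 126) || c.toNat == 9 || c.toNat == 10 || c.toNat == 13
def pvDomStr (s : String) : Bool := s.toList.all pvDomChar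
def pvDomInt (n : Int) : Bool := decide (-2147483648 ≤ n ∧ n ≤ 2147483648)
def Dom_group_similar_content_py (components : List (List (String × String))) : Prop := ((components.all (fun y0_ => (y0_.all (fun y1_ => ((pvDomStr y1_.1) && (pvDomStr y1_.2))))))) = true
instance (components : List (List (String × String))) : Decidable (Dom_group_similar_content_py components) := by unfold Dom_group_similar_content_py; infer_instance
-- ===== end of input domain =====

-- B replaces A's single pass with a per-item if/elif chain by four staged stable
-- partitions (sieve passes) whose pieces are assembled into the result at the end
-- (objective: alternative decomposition, same cost).

-- ===== PORT A =====

-- content = component.get("content", "").lower()  (appears verbatim in both Pythons)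
def pvContent (component : List (String × String)) : String :=
  PySem.Str.lower (PySem.Dict.getD (PySem.Dict.mk component) "content" "")

def pvAStep (groups : PySem.Dict String (List (List (String × String))))
    (component : List (String × String)) : PySem.Dict String (List (List (String × String))) :=
  let content := pvContent component
  if (["understand", "got it", "makes sense"].any fun w => PySem.Str.isIn w content) then
    groups.modify "confirmations" [] (fun l => l ++ [component])
  else if (["implement", "create", "build"].any fun w => PySem.Str.isIn w content) then
    groups.modify "technical_details" [] (fun l => l ++ [component])
  else if (["decide", "choose", "should"].any fun w => PySem.Str.isIn w content) then
    groups.modify "decisions" [] (fun l => l ++ [component])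
  else if (["insight", "realize", "breakthrough"].any fun w => PySem.Str.isIn w content) then
    groups.modify "insights" [] (fun l => l ++ [component])
  else
    groups.modify "explanations" [] (fun l => l ++ [component])

def group_similar_content_py (components : List (List (String × String))) : List (String × List (List (String × String))) :=
  (components.foldl pvAStep
    (PySem.Dict.ofList [("explanations", []), ("confirmations", []), ("repetitive_concepts", []),
      ("technical_details", []), ("decisions", []), ("insights", [])])).items

-- ===== PORT B =====

-- _split(items, keywords): one stable partition pass (hit/miss accumulators)
def pvSplit (items : List (List (String × String))) (keywords : List String) :
    List (List (String × String)) × List (List (String × String)) :=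
  items.foldl
    (fun acc comp =>
      if keywords.any (fun w => PySem.Str.isIn w (pvContent comp)) then
        (acc.1 ++ [comp], acc.2)
      else
        (acc.1, acc.2 ++ [comp]))
    ([], [])

def group_similar_content_py_alt (components : List (List (String × String))) : List (String × List (List (String × String))) :=
  let p1 := pvSplit components ["understand", "got it", "makes sense"]
  let p2 := pvSplit p1.2 ["implement", "create", "build"]
  let p3 := pvSplit p2.2 ["decide", "choose", "should"]
  let p4 := pvSplit p3.2 ["insight", "realize", "breakthrough"]
  [("explanations", p4.2), ("confirmations", p1.1), ("repetitive_concepts", []),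
   ("technical_details", p2.1), ("decisions", p3.1), ("insights", p4.1)]

-- ===== PRECONDITION & SPEC =====
def Spec_group_similar_content_py (components : List (List (String × String))) (out : List (String × List (List (String × String)))) : Prop := out = group_similar_content_py_alt components
instance (components : List (List (String × String))) (out : List (String × List (List (String × String)))) : Decidable (Spec_group_similar_content_py components out) := by unfold Spec_group_similar_content_py; infer_instance

-- ===== CLAIM (what is proved, stated in full; the proofs are below) =====
def Claim_equal_group_similar_content_py : Prop := ∀ (components : List (List (String × String))), Dom_group_similar_content_py components → Spec_group_similar_content_py components (group_similar_content_py components)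

-- ===== LEMMAS AND PROOFS =====

-- the four keyword tests, as abbreviations for the proofs
def pvM1 (x : List (String × String)) : Bool := ["understand", "got it", "makes sense"].any fun w => PySem.Str.isIn w (pvContent x)
def pvM2 (x : List (String × String)) : Bool := ["implement", "create", "build"].any fun w => PySem.Str.isIn w (pvContent x)
def pvM3 (x : List (String × String)) : Bool := ["decide", "choose", "should"].any fun w => PySem.Str.isIn w (pvContent x)
def pvM4 (x : List (String × String)) : Bool := ["insight", "realize", "breakthrough"].any fun w => PySem.Str.isIn w (pvContent x)

-- one sieve pass is a stable partition: hits and misses in order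
theorem pv_split_eq (l : List (List (String × String))) (kws : List String) :
    pvSplit l kws = (l.filter (fun x => kws.any fun w => PySem.Str.isIn w (pvContent x)),
                     l.filter (fun x => !(kws.any fun w => PySem.Str.isIn w (pvContent x)))) := by
  unfold pvSplit
  suffices h : ∀ (h m : List (List (String × String))),
      l.foldl (fun acc comp =>
        if kws.any (fun w => PySem.Str.isIn w (pvContent comp)) then (acc.1 ++ [comp], acc.2)
        else (acc.1, acc.2 ++ [comp])) (h, m)
      = (h ++ l.filter (fun x => kws.any fun w => PySem.Str.isIn w (pvContent x)),
         m ++ l.filter (fun x => !(kws.any fun w => PySem.Str.isIn w (pvContent x)))) by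
    simpa using h [] []
  induction l with
  | nil => intro h m; simp
  | cons x xs ih =>
    intro h m
    simp only [List.foldl_cons, List.filter_cons]
    cases hx : (kws.any fun w => PySem.Str.isIn w (pvContent x)) with
    | true => simp only [Bool.not_true, reduceIte, ih]; simp
    | false => simp only [Bool.not_false, Bool.false_eq_true, reduceIte, ih]; simp

-- composing two filters
theorem pv_filter_comp {α : Type} (p q : α → Bool) (l : List α) :
    (l.filter p).filter q = l.filter (fun x => p x && q x) := by
  induction l with
  | nil => rfl
  | cons x xs ih =>
    by_cases hp : p x = true
    · by_cases hq : q x = true <;> simp [List.filter_cons, hp, hq, ih]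
    · simp [List.filter_cons, hp, ih]

-- A's fold over the seeded six-key dict splits into the six sieve filters
theorem pv_foldA (cs : List (List (String × String))) (e c r t d i : List (List (String × String))) :
    (cs.foldl pvAStep (PySem.Dict.mk
        [("explanations", e), ("confirmations", c), ("repetitive_concepts", r),
         ("technical_details", t), ("decisions", d), ("insights", i)])).items
    = [("explanations", e ++ cs.filter (fun x => ((!pvM1 x && !pvM2 x) && !pvM3 x) && !pvM4 x)),
       ("confirmations", c ++ cs.filter (fun x => pvM1 x)),
       ("repetitive_concepts", r),
       ("technical_details", t ++ cs.filter (fun x => !pvM1 x && pvM2 x)),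
       ("decisions", d ++ cs.filter (fun x => (!pvM1 x && !pvM2 x) && pvM3 x)),
       ("insights", i ++ cs.filter (fun x => ((!pvM1 x && !pvM2 x) && !pvM3 x) && pvM4 x))] := by
  induction cs generalizing e c r t d i with
  | nil => simp
  | cons x cs ih =>
    by_cases h1 : pvM1 x = true
    · simp only [List.foldl_cons, pvAStep, show (["understand", "got it", "makes sense"].any fun w => PySem.Str.isIn w (pvContent x)) = true from h1, if_pos]
      rw [show (PySem.Dict.mk
          [("explanations", e), ("confirmations", c), ("repetitive_concepts", r),
           ("technical_details", t), ("decisions", d), ("insights", i)]).modify "confirmations" [] (fun l => l ++ [x])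
        = PySem.Dict.mk
          [("explanations", e), ("confirmations", c ++ [x]), ("repetitive_concepts", r),
           ("technical_details", t), ("decisions", d), ("insights", i)] from by
          simp [PySem.Dict.modify, PySem.Dict.get?, PySem.Dict.getD, PySem.Dict.insert, PySem.Dict.contains, List.find?]]
      rw [ih]
      simp [h1]
    · by_cases h2 : pvM2 x = true
      · simp only [List.foldl_cons, pvAStep,
          show (["understand", "got it", "makes sense"].any fun w => PySem.Str.isIn w (pvContent x)) = false from by simpa [pvM1] using h1,
          show (["implement", "create", "build"].any fun w => PySem.Str.isIn w (pvContent x)) = true from h2,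
          if_pos, if_neg, Bool.false_eq_true, not_false_eq_true]
        rw [show (PySem.Dict.mk
            [("explanations", e), ("confirmations", c), ("repetitive_concepts", r),
             ("technical_details", t), ("decisions", d), ("insights", i)]).modify "technical_details" [] (fun l => l ++ [x])
          = PySem.Dict.mk
            [("explanations", e), ("confirmations", c), ("repetitive_concepts", r),
             ("technical_details", t ++ [x]), ("decisions", d), ("insights", i)] from by
            simp [PySem.Dict.modify, PySem.Dict.get?, PySem.Dict.getD, PySem.Dict.insert, PySem.Dict.contains, List.find?]]
        rw [ih]
        simp [h1, h2]
      · by_cases h3 : pvM3 x = true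
        · simp only [List.foldl_cons, pvAStep,
            show (["understand", "got it", "makes sense"].any fun w => PySem.Str.isIn w (pvContent x)) = false from by simpa [pvM1] using h1,
            show (["implement", "create", "build"].any fun w => PySem.Str.isIn w (pvContent x)) = false from by simpa [pvM2] using h2,
            show (["decide", "choose", "should"].any fun w => PySem.Str.isIn w (pvContent x)) = true from h3,
            if_pos, if_neg, Bool.false_eq_true, not_false_eq_true]
          rw [show (PySem.Dict.mk
              [("explanations", e), ("confirmations", c), ("repetitive_concepts", r),
               ("technical_details", t), ("decisions", d), ("insights", i)]).modify "decisions" [] (fun l => l ++ [x])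
            = PySem.Dict.mk
              [("explanations", e), ("confirmations", c), ("repetitive_concepts", r),
               ("technical_details", t), ("decisions", d ++ [x]), ("insights", i)] from by
              simp [PySem.Dict.modify, PySem.Dict.get?, PySem.Dict.getD, PySem.Dict.insert, PySem.Dict.contains, List.find?]]
          rw [ih]
          simp [h1, h2, h3]
        · by_cases h4 : pvM4 x = true
          · simp only [List.foldl_cons, pvAStep,
              show (["understand", "got it", "makes sense"].any fun w => PySem.Str.isIn w (pvContent x)) = false from by simpa [pvM1] using h1,
              show (["implement", "create", "build"].any fun w => PySem.Str.isIn w (pvContent x)) = false from by simpa [pvM2] using h2,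
              show (["decide", "choose", "should"].any fun w => PySem.Str.isIn w (pvContent x)) = false from by simpa [pvM3] using h3,
              show (["insight", "realize", "breakthrough"].any fun w => PySem.Str.isIn w (pvContent x)) = true from h4,
              if_pos, if_neg, Bool.false_eq_true, not_false_eq_true]
            rw [show (PySem.Dict.mk
                [("explanations", e), ("confirmations", c), ("repetitive_concepts", r),
                 ("technical_details", t), ("decisions", d), ("insights", i)]).modify "insights" [] (fun l => l ++ [x])
              = PySem.Dict.mk
                [("explanations", e), ("confirmations", c), ("repetitive_concepts", r),
                 ("technical_details", t), ("decisions", d), ("insights", i ++ [x])] from by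
                simp [PySem.Dict.modify, PySem.Dict.get?, PySem.Dict.getD, PySem.Dict.insert, PySem.Dict.contains, List.find?]]
            rw [ih]
            simp [h1, h2, h3, h4]
          · simp only [List.foldl_cons, pvAStep,
              show (["understand", "got it", "makes sense"].any fun w => PySem.Str.isIn w (pvContent x)) = false from by simpa [pvM1] using h1,
              show (["implement", "create", "build"].any fun w => PySem.Str.isIn w (pvContent x)) = false from by simpa [pvM2] using h2,
              show (["decide", "choose", "should"].any fun w => PySem.Str.isIn w (pvContent x)) = false from by simpa [pvM3] using h3,
              show (["insight", "realize", "breakthrough"].any fun w => PySem.Str.isIn w (pvContent x)) = false from by simpa [pvM4] using h4,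
              if_neg, Bool.false_eq_true, not_false_eq_true]
            rw [show (PySem.Dict.mk
                [("explanations", e), ("confirmations", c), ("repetitive_concepts", r),
                 ("technical_details", t), ("decisions", d), ("insights", i)]).modify "explanations" [] (fun l => l ++ [x])
              = PySem.Dict.mk
                [("explanations", e ++ [x]), ("confirmations", c), ("repetitive_concepts", r),
                 ("technical_details", t), ("decisions", d), ("insights", i)] from by
                simp [PySem.Dict.modify, PySem.Dict.get?, PySem.Dict.getD, PySem.Dict.insert, PySem.Dict.contains, List.find?]]
            rw [ih]
            simp [h1, h2, h3, h4]

-- ===== VERDICT (by name: the statement is the Claim_ definition above) =====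
theorem group_similar_content_py_spec : Claim_equal_group_similar_content_py := by
  intro components _
  unfold Spec_group_similar_content_py group_similar_content_py group_similar_content_py_alt
  have hseed : (PySem.Dict.ofList
      ([("explanations", []), ("confirmations", []), ("repetitive_concepts", []),
        ("technical_details", []), ("decisions", []), ("insights", [])] :
        List (String × List (List (String × String)))))
      = PySem.Dict.mk [("explanations", []), ("confirmations", []), ("repetitive_concepts", []),
        ("technical_details", []), ("decisions", []), ("insights", [])] := by rfl
  rw [hseed, pv_foldA]
  simp only [pv_split_eq, pv_filter_comp]
  simp [pvM1, pvM2, pvM3, pvM4, Bool.and_assoc]
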